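-- pv_equiv track=rewrite | github.com/kaushikk1999/Code-Complexity-Analyzer | utils/entrypoints.py | normalize_leetcode_style_assignments
-- ===== SOURCE A (Python) =====
-- def normalize_leetcode_style_assignments(text: str) -> str:
--     """Convert LeetCode-style copied input into Python assignment input.
--
--     Example:
--         s =
--         "leetcode"
--         wordDict =
--         ["leet", "code"]
--
--     becomes:
--         s = "leetcode"
--         wordDict = ["leet", "code"]
--     """
--     lines = [line.strip() for line in (text or "").splitlines() if line.strip()]
--     normalized = []
--     index = 0
--
--     while index < len(lines):
--         line = lines[index]
--
--         if line.endswith("=") and index + 1 < len(lines):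
--             name = line[:-1].strip()
--             value = lines[index + 1].strip()
--             if name.isidentifier():
--                 normalized.append(f"{name} = {value}")
--                 index += 2
--                 continue
--
--         normalized.append(line)
--         index += 1
--
--     return "\n".join(normalized)
-- ===== SOURCE B (Python) =====
-- def normalize_leetcode_style_assignments(text: str) -> str:
--     """Single forward pass carrying a `pending` assignment target instead of
--     index-based lookahead."""
--     out = []
--     pending = None  # (identifier name, original stripped line)
--     for raw in (text or "").splitlines():
--         line = raw.strip()
--         if not line:
--             continue
--         if pending is not None:
--             out.append(f"{pending[0]} = {line}")
--             pending = None
--         else: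
--             name = line[:-1].strip()
--             if line.endswith("=") and name.isidentifier():
--                 pending = (name, line)
--             else:
--                 out.append(line)
--     if pending is not None:
--         out.append(pending[1])
--     return "\n".join(out)
-- ===== Notes on version B (the rewrite author's own statement) =====
-- stated objective: alternative
-- what changed: Replaced A's index-based while-loop that peeks at lines[index+1] and advances by 2 on a merge with a single forward pass carrying a `pending` assignment-target state (flushed verbatim if still set at the end).
import Mathlib
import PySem

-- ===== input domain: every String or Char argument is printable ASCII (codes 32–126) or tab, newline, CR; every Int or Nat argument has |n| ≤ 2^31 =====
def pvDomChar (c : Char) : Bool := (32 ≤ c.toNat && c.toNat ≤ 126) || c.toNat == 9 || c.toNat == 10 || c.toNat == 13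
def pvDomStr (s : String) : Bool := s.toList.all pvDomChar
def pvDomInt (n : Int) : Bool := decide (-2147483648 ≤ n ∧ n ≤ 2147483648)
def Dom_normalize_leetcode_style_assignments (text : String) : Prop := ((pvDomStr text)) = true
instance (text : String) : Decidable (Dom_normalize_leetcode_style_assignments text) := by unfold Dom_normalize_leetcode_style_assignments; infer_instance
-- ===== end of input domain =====

-- B replaces A's index-based while-loop with lookahead (index += 2) by a single forward
-- pass carrying a `pending` assignment-target state; same return value on the whole domain.

-- shared helper: port of Python str.isidentifier, exact on the ASCII domain
-- (first char alphabetic or '_', remaining chars alphanumeric or '_', nonempty)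
def pyIsIdentifier : List Char → Bool
  | [] => false
  | c :: rest => (PySem.Chars.isalpha c || c == '_') &&
      rest.all (fun d => PySem.Chars.isalnum d || d == '_')

-- ===== PORT A =====
-- lines = [line.strip() for line in (text or "").splitlines() if line.strip()]
-- ((text or "") has the same characters as text, so it is ported as text)
def pvLinesOf (text : String) : List (List Char) :=
  ((PySem.Chars.splitlines text.toList).filter
      (fun l => !(PySem.Chars.strip l).isEmpty)).map PySem.Chars.strip

-- the while-loop over `index`, with its two-step advance on a merge
def pvLoopA : List (List Char) → List (List Char)
  | [] => []
  | [l] => [l]                                -- index + 1 < len(lines) is false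
  | l :: v :: rest =>
    if PySem.Chars.endswith l ['='] then
      let name := PySem.Chars.strip (PySem.List.slice l none (some (-1)))
      if pyIsIdentifier name then
        (name ++ [' ', '=', ' '] ++ PySem.Chars.strip v) :: pvLoopA rest
      else l :: pvLoopA (v :: rest)
    else l :: pvLoopA (v :: rest)

def normalize_leetcode_style_assignments (text : String) : String :=
  String.ofList (PySem.Chars.join ['\n'] (pvLoopA (pvLinesOf text)))

-- ===== PORT B =====
-- single pass over the raw lines; the state is `pending` = none, or
-- some (identifier name, original stripped line)
def pvLoopB (pending : Option (List Char × List Char)) :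
    List (List Char) → List (List Char)
  | [] => match pending with
          | some (_, orig) => [orig]
          | none => []
  | raw :: rest =>
    let line := PySem.Chars.strip raw
    if line.isEmpty then pvLoopB pending rest   -- `continue` on blank lines
    else match pending with
      | some (nm, _) => (nm ++ [' ', '=', ' '] ++ line) :: pvLoopB none rest
      | none =>
        let name := PySem.Chars.strip (PySem.List.slice line none (some (-1)))
        if PySem.Chars.endswith line ['='] && pyIsIdentifier name then
          pvLoopB (some (name, line)) rest
        else line :: pvLoopB none rest

def normalize_leetcode_style_assignments_alt (text : String) : String :=
  String.ofList (PySem.Chars.join ['\n'] (pvLoopB none (PySem.Chars.splitlines text.toList)))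

-- ===== PRECONDITION & SPEC =====
def Spec_normalize_leetcode_style_assignments (text : String) (out : String) : Prop := out = normalize_leetcode_style_assignments_alt text
instance (text : String) (out : String) : Decidable (Spec_normalize_leetcode_style_assignments text out) := by unfold Spec_normalize_leetcode_style_assignments; infer_instance

-- ===== CLAIM (what is proved, stated in full; the proofs are below) =====
def Claim_equal_normalize_leetcode_style_assignments : Prop := ∀ (text : String), Dom_normalize_leetcode_style_assignments text → Spec_normalize_leetcode_style_assignments text (normalize_leetcode_style_assignments text)

-- ===== LEMMAS AND PROOFS =====

-- proof-only: B's loop restricted to the already-stripped, nonempty lines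
def pvLoopBs (pending : Option (List Char × List Char)) :
    List (List Char) → List (List Char)
  | [] => match pending with
          | some (_, orig) => [orig]
          | none => []
  | l :: rest =>
    match pending with
    | some (nm, _) => (nm ++ [' ', '=', ' '] ++ l) :: pvLoopBs none rest
    | none =>
      let name := PySem.Chars.strip (PySem.List.slice l none (some (-1)))
      if PySem.Chars.endswith l ['='] && pyIsIdentifier name then
        pvLoopBs (some (name, l)) rest
      else l :: pvLoopBs none rest

theorem dropWhile_idem (p : Char → Bool) (l : List Char) :
    List.dropWhile p (List.dropWhile p l) = List.dropWhile p l := by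
  induction l with
  | nil => simp
  | cons a l ih => by_cases h : p a <;> simp [h, ih]

theorem rstrip_idem (t : List Char) :
    PySem.Chars.rstrip (PySem.Chars.rstrip t) = PySem.Chars.rstrip t := by
  simp [PySem.Chars.rstrip, dropWhile_idem]

theorem strip_idem (l : List Char) :
    PySem.Chars.strip (PySem.Chars.strip l) = PySem.Chars.strip l := by
  show PySem.Chars.rstrip (PySem.Chars.lstrip (PySem.Chars.rstrip (PySem.Chars.lstrip l)))
      = PySem.Chars.rstrip (PySem.Chars.lstrip l)
  have ht : List.dropWhile PySem.Chars.isspace (PySem.Chars.lstrip l) = PySem.Chars.lstrip l :=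
    dropWhile_idem _ l
  have hpre : PySem.Chars.rstrip (PySem.Chars.lstrip l) <+: PySem.Chars.lstrip l := by
    rw [PySem.Chars.rstrip, ← List.reverse_suffix]
    simp [List.dropWhile_suffix]
  have hl : PySem.Chars.lstrip (PySem.Chars.rstrip (PySem.Chars.lstrip l))
      = PySem.Chars.rstrip (PySem.Chars.lstrip l) := by
    cases hs : PySem.Chars.rstrip (PySem.Chars.lstrip l) with
    | nil => simp [PySem.Chars.lstrip]
    | cons a s' =>
      rw [hs] at hpre
      obtain ⟨r, hr⟩ := hpre
      have hlen : 0 < (PySem.Chars.lstrip l).length := by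
        rw [← hr]; simp
      have h0 : ¬ PySem.Chars.isspace (PySem.Chars.lstrip l)[0] = true :=
        List.dropWhile_eq_self_iff.mp ht hlen
      have ha : (PySem.Chars.lstrip l)[0] = a := by
        simp [← hr]
      rw [ha] at h0
      simp [PySem.Chars.lstrip, h0]
  rw [hl, rstrip_idem]

theorem loopB_eq_loopBs (raws : List (List Char)) :
    ∀ pending, pvLoopB pending raws =
      pvLoopBs pending ((raws.filter (fun l => !(PySem.Chars.strip l).isEmpty)).map PySem.Chars.strip) := by
  induction raws with
  | nil => intro pending; rfl
  | cons raw rest ih =>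
    intro pending
    by_cases h : (PySem.Chars.strip raw).isEmpty
    · simp only [pvLoopB, h, List.filter_cons, if_pos]
      simp [ih]
    · simp only [pvLoopB, h, List.filter_cons]
      simp only [Bool.not_false, if_true, List.map_cons]
      cases pending with
      | some p => simp [pvLoopBs, ih]
      | none =>
        by_cases hc : (PySem.Chars.endswith (PySem.Chars.strip raw) ['='] &&
            pyIsIdentifier (PySem.Chars.strip (PySem.List.slice (PySem.Chars.strip raw) none (some (-1))))) = true
        · simp [pvLoopBs, hc, ih]
        · simp [pvLoopBs, hc, ih]

theorem loopA_eq_loopBs (lines : List (List Char))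
    (h : ∀ l ∈ lines, PySem.Chars.strip l = l) :
    pvLoopA lines = pvLoopBs none lines := by
  induction lines using pvLoopA.induct with
  | case1 => rfl
  | case2 l => simp only [pvLoopA, pvLoopBs]; split <;> rfl
  | case3 l v rest hend name hid ih =>
    have hv : PySem.Chars.strip v = v := h v (by simp)
    have ih' := ih (fun x hx => h x (by simp [hx]))
    have hid' : pyIsIdentifier (PySem.Chars.strip (PySem.List.slice l none (some (-1)))) = true := hid
    simp [pvLoopA, pvLoopBs, hend, hid', hv, ih']
  | case4 l v rest hend name hid ih =>
    have ih' := ih (fun x hx => h x (by simp [hx]))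
    have hid' : ¬ pyIsIdentifier (PySem.Chars.strip (PySem.List.slice l none (some (-1)))) = true := hid
    simp [pvLoopA, pvLoopBs, hend, hid', ih']
  | case5 l v rest hend ih =>
    have ih' := ih (fun x hx => h x (by simp [hx]))
    simp [pvLoopA, pvLoopBs, hend, ih']

-- ===== VERDICT (by name: the statement is the Claim_ definition above) =====
theorem normalize_leetcode_style_assignments_spec : Claim_equal_normalize_leetcode_style_assignments := by
  intro text _
  unfold Spec_normalize_leetcode_style_assignments
  unfold normalize_leetcode_style_assignments normalize_leetcode_style_assignments_alt
  rw [loopB_eq_loopBs _ none]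
  have h : ∀ l ∈ pvLinesOf text, PySem.Chars.strip l = l := by
    intro l hl
    unfold pvLinesOf at hl
    rcases List.mem_map.mp hl with ⟨r, _, rfl⟩
    exact strip_idem r
  rw [loopA_eq_loopBs _ h]
  rfl
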